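-- pv_equiv track=rewrite | github.com/fellowapp/mudder-py | mudder.py | long_sub_same_len
-- ===== SOURCE A (Python) =====
-- from typing import Dict, Iterable, List, Optional, Reversible, Tuple, Union
--
-- def long_sub_same_len(  # noqa: C901
--     a: List[int],
--     b: List[int],
--     base: int,
--     remainder: Optional[Tuple[int, int]] = None,
--     denominator=0,
-- ) -> Tuple[List[int], int]:
--     if len(a) != len(b):
--         raise ValueError("a and b should have same length")
--
--     a = a.copy()  # pre-emptively copy
--     if remainder:
--         a.append(remainder[0])
--         b = b.copy()
--         b.append(remainder[1])
--
--     ret = [0] * len(a)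
--
--     for i in reversed(range(len(a))):
--         if a[i] >= b[i]:
--             ret[i] = a[i] - b[i]
--             continue
--         if i == 0:
--             raise ValueError("Cannot go negative")
--         do_break = False
--         # look for a digit to the left to borrow from
--         for j in reversed(range(i)):
--             if a[j] > 0:
--                 # found a non-zero digit. Decrement it
--                 a[j] -= 1
--                 # increment all digits to the right by `base-1`
--                 for k in range(j + 1, i):
--                     a[k] += base - 1
--                 # until you reach the digit you couldn't subtract
--                 ret[i] = (
--                     a[i]
--                     + (denominator if remainder and i == len(a) - 1 else base)
--                     - b[i]
--                 )
--                 do_break = True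
--                 break
--         if do_break:
--             continue
--         raise ValueError("Failed to find digit to borrow from")
--     if remainder:
--         # result, remainder
--         return ret[:-1], ret[-1]
--     return ret, 0
-- ===== SOURCE B (Python) =====
-- def long_sub_same_len(a, b, base, remainder=None, denominator=0):
--     """Positional subtraction in one right-to-left pass carrying a borrow flag."""
--     if len(a) != len(b):
--         raise ValueError("a and b should have same length")
--     xs = list(a)
--     ys = list(b)
--     if remainder:
--         xs.append(remainder[0])
--         ys.append(remainder[1])
--     out = []
--     borrow = 0
--     add = denominator if remainder else base
--     for x, y in zip(reversed(xs), reversed(ys)):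
--         d = x - borrow - y
--         if d >= 0:
--             out.append(d)
--             borrow = 0
--         else:
--             out.append(d + add)
--             borrow = 1
--         add = base
--     if borrow:
--         raise ValueError("Cannot go negative")
--     out.reverse()
--     if remainder:
--         return out[:-1], out[-1]
--     return out, 0
-- ===== Notes on version B (the rewrite author's own statement) =====
-- stated objective: faster
-- what changed: Replaced A's per-digit borrow search (scan left for a nonzero digit, decrement it and rewrite every digit in between) by a single right-to-left pass carrying a 0/1 borrow flag; Pre_ restricts to the natural domain (canonical nonnegative digits with minuend >= subtrahend, or deficits absorbed by the adjacent digit), excluding inputs where A raises ValueError and non-canonical inputs where A's long-range digit rewriting yields accidental values.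
-- outside the precondition, e.g. on long_sub_same_len([2, 0, 0], [0, 2, 1], 2, None, 0): A returns ([0, 1, 1], 0), B returns ([1, -1, 1], 0)
import Mathlib
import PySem

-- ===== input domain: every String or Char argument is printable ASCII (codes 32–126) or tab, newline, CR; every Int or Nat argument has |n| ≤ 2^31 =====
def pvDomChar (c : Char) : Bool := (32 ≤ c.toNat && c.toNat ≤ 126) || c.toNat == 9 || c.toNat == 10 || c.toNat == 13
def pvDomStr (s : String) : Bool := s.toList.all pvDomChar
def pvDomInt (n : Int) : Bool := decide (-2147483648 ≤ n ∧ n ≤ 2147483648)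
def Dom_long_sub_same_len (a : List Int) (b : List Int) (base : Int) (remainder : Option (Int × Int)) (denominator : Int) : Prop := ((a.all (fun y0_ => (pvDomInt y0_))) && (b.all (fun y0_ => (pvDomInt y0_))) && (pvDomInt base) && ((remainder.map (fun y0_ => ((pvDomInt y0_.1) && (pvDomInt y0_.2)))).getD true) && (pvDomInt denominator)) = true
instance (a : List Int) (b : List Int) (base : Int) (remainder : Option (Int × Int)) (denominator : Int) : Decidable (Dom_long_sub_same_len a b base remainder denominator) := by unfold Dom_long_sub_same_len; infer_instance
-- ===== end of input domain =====

-- B replaces A's quadratic borrow-search (scan left for a nonzero digit, rewrite intermediate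
-- digits) by one right-to-left pass with a 0/1 borrow flag; equality is proved on the natural
-- domain stated in Pre_.

-- ===== PORT A =====
-- inner loop `for j in reversed(range(i)): if a[j] > 0: …`: first index j < i (scanning down) with a[j] > 0
def pvFindJ (av : List Int) : Nat → Option Nat
  | 0 => none
  | j + 1 => if 0 < av.getD j 0 then some j else pvFindJ av j

-- `for k in range(j+1, i): a[k] += base - 1`
def pvBump (base : Int) (av : List Int) (j i : Nat) : List Int :=
  (List.range' (j + 1) (i - (j + 1))).foldl (fun l t => l.set t (l.getD t 0 + (base - 1))) av

-- `for i in reversed(range(len(a))): …`, state = (mutated a, ret); fuel k means indices k-1,…,0 remain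
def pvLoopA (bb : List Int) (base den : Int) (hasRem : Bool) (n : Nat) :
    Nat → List Int → List Int → List Int × List Int
  | 0, av, ret => (av, ret)
  | k + 1, av, ret =>
    if av.getD k 0 ≥ bb.getD k 0 then
      pvLoopA bb base den hasRem n k av (ret.set k (av.getD k 0 - bb.getD k 0))
    else if k = 0 then (av, ret)  -- Python: raise ValueError("Cannot go negative"); outside Pre_
    else
      match pvFindJ av k with
      | none => (av, ret)  -- Python: raise ValueError("Failed to find digit to borrow from"); outside Pre_
      | some j =>
        let av2 := pvBump base (av.set j (av.getD j 0 - 1)) j k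
        pvLoopA bb base den hasRem n k av2
          (ret.set k (av2.getD k 0 + (if hasRem ∧ k = n - 1 then den else base) - bb.getD k 0))

def long_sub_same_len (a : List Int) (b : List Int) (base : Int) (remainder : Option (Int × Int)) (denominator : Int) : List Int × Int :=
  if a.length ≠ b.length then ([], 0)  -- Python: raise ValueError; outside Pre_
  else
    let aa := match remainder with | some r => a ++ [r.1] | none => a
    let bb := match remainder with | some r => b ++ [r.2] | none => b
    let n := aa.length
    let ret := (pvLoopA bb base denominator remainder.isSome n n aa (List.replicate n 0)).2
    match remainder with
    | some _ => (ret.dropLast, ret.getLastD 0)  -- ret[:-1], ret[-1] (ret nonempty here)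
    | none => (ret, 0)

-- ===== PORT B =====
-- one loop iteration `d = x - borrow - y; …; add = base`: state = (out, borrow, add)
def pvStepB (base : Int) : (List Int × Int × Int) → (Int × Int) → (List Int × Int × Int)
  | (out, borrow, add), (x, y) =>
    let d := x - borrow - y
    if d ≥ 0 then (out ++ [d], 0, base) else (out ++ [d + add], 1, base)

def long_sub_same_len_alt (a : List Int) (b : List Int) (base : Int) (remainder : Option (Int × Int)) (denominator : Int) : List Int × Int :=
  if a.length ≠ b.length then ([], 0)  -- Python: raise ValueError; outside Pre_
  else
    let xs := match remainder with | some r => a ++ [r.1] | none => a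
    let ys := match remainder with | some r => b ++ [r.2] | none => b
    let add0 := if remainder.isSome then denominator else base
    let st : List Int × Int × Int := ((xs.reverse).zip (ys.reverse)).foldl (pvStepB base) ([], 0, add0)
    if st.2.1 ≠ 0 then ([], 0)  -- Python: raise ValueError("Cannot go negative"); outside Pre_
    else
      let out := st.1.reverse
      match remainder with
      | some _ => (out.dropLast, out.getLastD 0)
      | none => (out, 0)

-- ===== PRECONDITION & SPEC =====
-- Python's `<` on equal-length int lists (lexicographic)
def pvLexLt : List Int → List Int → Bool
  | [], [] => false
  | [], _ :: _ => true
  | _ :: _, [] => false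
  | x :: xs, y :: ys => x < y || (x == y && pvLexLt xs ys)

-- Pre_ = the inputs on which the claimed value is A's: equal lengths, and either (i) every digit
-- deficit is absorbed by the digit immediately to its left (this includes all inputs needing no
-- borrow at all), or (ii) the function's natural domain — nonnegative digits, subtrahend digits
-- canonical in [0, base), minuend ≥ subtrahend.  Pre_ excludes the inputs where A raises
-- ValueError, and the non-canonical inputs on which A's long-range borrow bookkeeping
-- (decrement a far digit, overwrite every digit in between with base-1) yields accidental
-- values that B does not reproduce (see cites).
def Pre_long_sub_same_len (a : List Int) (b : List Int) (base : Int) (remainder : Option (Int × Int)) (denominator : Int) : Prop :=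
  a.length = b.length ∧
  ((∀ i, i < (match remainder with | some r => a ++ [r.1] | none => a).length →
      ((match remainder with | some r => a ++ [r.1] | none => a).getD i 0 : Int) <
        ((match remainder with | some r => b ++ [r.2] | none => b).getD i 0 : Int) →
      1 ≤ i ∧ (0 : Int) < (match remainder with | some r => a ++ [r.1] | none => a).getD (i - 1) 0 ∧
        ((match remainder with | some r => b ++ [r.2] | none => b).getD (i - 1) 0 : Int) ≤
          ((match remainder with | some r => a ++ [r.1] | none => a).getD (i - 1) 0 : Int) - 1) ∨
   ((∀ d ∈ a, 0 ≤ d) ∧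
    (∀ d ∈ b, 0 ≤ d ∧ d < base) ∧
    (match remainder with | some r => 0 ≤ r.1 ∧ 0 ≤ r.2 | none => True) ∧
    pvLexLt (match remainder with | some r => a ++ [r.1] | none => a)
            (match remainder with | some r => b ++ [r.2] | none => b) = false))

instance (a : List Int) (b : List Int) (base : Int) (remainder : Option (Int × Int)) (denominator : Int) : Decidable (Pre_long_sub_same_len a b base remainder denominator) := by
  unfold Pre_long_sub_same_len
  rcases remainder with _ | r <;> infer_instance

def pvWitness_long_sub_same_len : List Int × List Int × Int × (Option (Int × Int)) × Int :=
  ([1, 0], [0, 1], 10, some (2, 5), 7)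

def Spec_long_sub_same_len (a : List Int) (b : List Int) (base : Int) (remainder : Option (Int × Int)) (denominator : Int) (out : List Int × Int) : Prop := out = long_sub_same_len_alt a b base remainder denominator
instance (a : List Int) (b : List Int) (base : Int) (remainder : Option (Int × Int)) (denominator : Int) (out : List Int × Int) : Decidable (Spec_long_sub_same_len a b base remainder denominator out) := by unfold Spec_long_sub_same_len; infer_instance

-- ===== CLAIM (what is proved, stated in full; the proofs are below) =====
def Claim_equal_long_sub_same_len : Prop := ∀ (a : List Int) (b : List Int) (base : Int) (remainder : Option (Int × Int)) (denominator : Int), Dom_long_sub_same_len a b base remainder denominator → Pre_long_sub_same_len a b base remainder denominator → Spec_long_sub_same_len a b base remainder denominator (long_sub_same_len a b base remainder denominator)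

-- ===== LEMMAS AND PROOFS =====

-- the abstract borrow-flag recursion both ports are related to: fuel k, incoming borrow c;
-- returns (digits for indices 0..k-1 left-to-right, final borrow)
def pvFlag (aa bb : List Int) (base den : Int) (hasRem : Bool) (n : Nat) : Nat → Int → List Int × Int
  | 0, c => ([], c)
  | k + 1, c =>
    let d := aa.getD k 0 - c - bb.getD k 0
    if d ≥ 0 then
      let r := pvFlag aa bb base den hasRem n k 0
      (r.1 ++ [d], r.2)
    else
      let r := pvFlag aa bb base den hasRem n k 1
      (r.1 ++ [d + (if hasRem ∧ k = n - 1 then den else base)], r.2)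

-- A's mutated digit list av versus the original aa, given the pending borrow flag c
def pvInvA (aa : List Int) (base : Int) (n k : Nat) (c : Int) (av : List Int) : Prop :=
  av.length = aa.length ∧
  ((c = 0 ∧ ∀ t, t < k → av.getD t 0 = aa.getD t 0) ∨
   (c = 1 ∧ k < n ∧ ∃ j, j < k ∧ 0 < aa.getD j 0 ∧ av.getD j 0 = aa.getD j 0 - 1 ∧
     (∀ t, j < t → t < k → aa.getD t 0 = 0 ∧ av.getD t 0 = base - 1) ∧
     (∀ t, t < j → av.getD t 0 = aa.getD t 0)))

-- feasibility of the remaining subtraction (no ValueError ahead)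
def pvFeas (aa bb : List Int) (k : Nat) (c : Int) : Prop :=
  pvLexLt (aa.take k) (bb.take k) = false ∧ (c = 1 → aa.take k ≠ bb.take k)

theorem pvGetD_set (l : List Int) (i : Nat) (a : Int) (j : Nat) :
    (l.set i a).getD j 0 = if i = j ∧ i < l.length then a else l.getD j 0 := by
  simp only [List.getD_eq_getElem?_getD, List.getElem?_set]
  split_ifs with h1 h2 h3 <;> simp_all <;> omega

theorem pvGetD_append_lt (l : List Int) (x : Int) (t : Nat) (h : t < l.length) :
    (l ++ [x]).getD t 0 = l.getD t 0 := by
  simp [List.getD_eq_getElem?_getD, List.getElem?_append_left h]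

theorem pvGetD_append_len (l : List Int) (x : Int) :
    (l ++ [x]).getD l.length 0 = x := by
  simp [List.getD_eq_getElem?_getD]

theorem pvTake_succ (l : List Int) (k : Nat) (h : k < l.length) :
    l.take (k + 1) = l.take k ++ [l.getD k 0] := by
  rw [List.take_add_one]
  simp [List.getElem?_eq_getElem h, List.getD_eq_getElem?_getD]

theorem pvLexLt_append (p q : List Int) (x y : Int) (h : p.length = q.length) :
    (pvLexLt (p ++ [x]) (q ++ [y]) = false) ↔
      (pvLexLt p q = false ∧ (p = q → ¬ x < y)) := by
  induction p generalizing q with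
  | nil =>
    cases q with
    | nil => simp [pvLexLt]
    | cons hd tl => simp at h
  | cons hd tl ih =>
    cases q with
    | nil => simp at h
    | cons hd' tl' =>
      simp only [List.length_cons, Nat.add_right_cancel_iff] at h
      simp only [List.cons_append, pvLexLt]
      by_cases he : hd = hd'
      · subst he
        simpa [lt_irrefl] using ih tl' h
      · by_cases hl : hd < hd'
        · simp [hl, he]
        · simp [hl, he]

theorem pvLex_exists_pos (p q : List Int) (h : p.length = q.length)
    (hlt : pvLexLt p q = false) (hne : p ≠ q)
    (hq : ∀ d ∈ q, 0 ≤ d) : ∃ t, t < p.length ∧ 0 < p.getD t 0 := by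
  induction p generalizing q with
  | nil =>
    cases q with
    | nil => exact absurd rfl hne
    | cons hd tl => simp at h
  | cons hd tl ih =>
    cases q with
    | nil => simp at h
    | cons hd' tl' =>
      simp only [List.length_cons, Nat.add_right_cancel_iff] at h
      simp only [pvLexLt, Bool.or_eq_false_iff, Bool.and_eq_false_iff,
        decide_eq_false_iff_not, beq_eq_false_iff_ne, ne_eq] at hlt
      rcases hlt with ⟨h1, h2⟩
      by_cases he : hd = hd'
      · rcases h2 with h2 | h2
        · exact absurd he h2
        · have hne' : tl ≠ tl' := fun h' => hne (by rw [he, h'])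
          rcases ih tl' h h2 hne' (fun d hd => hq d (List.mem_cons_of_mem _ hd)) with ⟨t, ht, hp⟩
          exact ⟨t + 1, by simpa using ht, by simpa using hp⟩
      · have : hd' < hd := lt_of_le_of_ne (not_lt.mp h1) (Ne.symm he)
        have : 0 < hd := lt_of_le_of_lt (hq hd' (List.mem_cons_self)) this
        exact ⟨0, by simp, by simpa⟩

theorem pvFindJ_some (av : List Int) (i j : Nat) (h : pvFindJ av i = some j) :
    j < i ∧ 0 < av.getD j 0 ∧ ∀ t, j < t → t < i → av.getD t 0 ≤ 0 := by
  induction i with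
  | zero => simp [pvFindJ] at h
  | succ i ih =>
    simp only [pvFindJ] at h
    split_ifs at h with hp
    · cases h
      exact ⟨Nat.lt_succ_self _, hp, fun t ht1 ht2 => absurd ht2 (by omega)⟩
    · rcases ih h with ⟨h1, h2, h3⟩
      refine ⟨Nat.lt_succ_of_lt h1, h2, fun t ht1 ht2 => ?_⟩
      rcases Nat.lt_succ_iff_lt_or_eq.mp ht2 with h' | h'
      · exact h3 t ht1 h'
      · subst h'; exact not_lt.mp hp

theorem pvFindJ_finds (av : List Int) (i t : Nat) (ht : t < i) (hpos : 0 < av.getD t 0) :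
    ∃ j, pvFindJ av i = some j := by
  induction i with
  | zero => omega
  | succ i ih =>
    simp only [pvFindJ]
    split_ifs with hp
    · exact ⟨i, rfl⟩
    · rcases Nat.lt_succ_iff_lt_or_eq.mp ht with h' | h'
      · exact ih h'
      · subst h'; exact absurd hpos (by simpa using hp)

theorem pvBump_getD (base : Int) (av : List Int) (j i t : Nat) :
    (pvBump base av j i).getD t 0 =
      if j + 1 ≤ t ∧ t < i ∧ t < av.length then av.getD t 0 + (base - 1)
      else av.getD t 0 := by
  have key : ∀ (cnt s : Nat) (l : List Int) (t : Nat),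
      ((List.range' s cnt).foldl (fun l t => l.set t (l.getD t 0 + (base - 1))) l).getD t 0 =
        if s ≤ t ∧ t < s + cnt ∧ t < l.length then l.getD t 0 + (base - 1) else l.getD t 0 := by
    intro cnt
    induction cnt with
    | zero =>
      intro s l t
      rw [show List.range' s 0 = [] from rfl, List.foldl_nil,
        if_neg (by omega : ¬ (s ≤ t ∧ t < s + 0 ∧ t < l.length))]
    | succ cnt ih =>
      intro s l t
      rw [List.range'_succ, List.foldl_cons, ih]
      simp only [pvGetD_set, List.length_set]
      by_cases hst : s = t
      · subst hst
        split_ifs <;> first | rfl | omega | (exfalso; omega)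
      · split_ifs <;> first | rfl | omega | (exfalso; omega)
  rw [pvBump, key]
  split_ifs <;> first | rfl | omega | (exfalso; omega)

theorem pvBump_length (base : Int) (av : List Int) (j i : Nat) :
    (pvBump base av j i).length = av.length := by
  have key : ∀ (r : List Nat) (l : List Int),
      (r.foldl (fun l t => l.set t (l.getD t 0 + (base - 1))) l).length = l.length := by
    intro r
    induction r with
    | nil => intro l; rfl
    | cons hd tl ih => intro l; rw [List.foldl_cons, ih, List.length_set]
  exact key _ _

theorem pvGetD_take (l : List Int) (k t : Nat) (ht : t < k) :
    (l.take k).getD t 0 = l.getD t 0 := by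
  rw [List.getD_eq_getElem?_getD, List.getD_eq_getElem?_getD, List.getElem?_take_of_lt ht]

theorem pvLength_take (l : List Int) (k : Nat) (h : k ≤ l.length) :
    (l.take k).length = k := by
  simp [List.length_take]; omega

theorem pvAppend_eq (p q : List Int) (x y : Int) (h : p.length = q.length) :
    (p ++ [x] = q ++ [y]) ↔ (p = q ∧ x = y) := by
  constructor
  · intro he
    rcases List.append_inj he h with ⟨h1, h2⟩
    exact ⟨h1, by simpa using h2⟩
  · rintro ⟨rfl, rfl⟩; rfl

theorem pvLoopA_succ (bb : List Int) (base den : Int) (hasRem : Bool) (n k : Nat)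
    (av ret : List Int) :
    pvLoopA bb base den hasRem n (k + 1) av ret =
      if av.getD k 0 ≥ bb.getD k 0 then
        pvLoopA bb base den hasRem n k av (ret.set k (av.getD k 0 - bb.getD k 0))
      else if k = 0 then (av, ret)
      else
        match pvFindJ av k with
        | none => (av, ret)
        | some j =>
          let av2 := pvBump base (av.set j (av.getD j 0 - 1)) j k
          pvLoopA bb base den hasRem n k av2
            (ret.set k (av2.getD k 0 + (if hasRem ∧ k = n - 1 then den else base) - bb.getD k 0)) := rfl

theorem pvFlag_succ (aa bb : List Int) (base den : Int) (hasRem : Bool) (n k : Nat) (c : Int) :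
    pvFlag aa bb base den hasRem n (k + 1) c =
      (if aa.getD k 0 - c - bb.getD k 0 ≥ 0 then
        ((pvFlag aa bb base den hasRem n k 0).1 ++ [aa.getD k 0 - c - bb.getD k 0],
         (pvFlag aa bb base den hasRem n k 0).2)
      else
        ((pvFlag aa bb base den hasRem n k 1).1
           ++ [aa.getD k 0 - c - bb.getD k 0 + (if hasRem ∧ k = n - 1 then den else base)],
         (pvFlag aa bb base den hasRem n k 1).2)) := by
  rw [pvFlag]

theorem pvTakeRev_succ (l : List Int) (k : Nat) (h : k < l.length) :
    (l.take (k + 1)).reverse = l.getD k 0 :: (l.take k).reverse := by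
  rw [pvTake_succ l k h]
  simp

theorem pvLoopA_ret_length (bb : List Int) (base den : Int) (hasRem : Bool) (n : Nat) :
    ∀ k av ret, ((pvLoopA bb base den hasRem n k av ret).2).length = ret.length := by
  intro k
  induction k with
  | zero => intro av ret; rfl
  | succ k ih =>
    intro av ret
    rw [pvLoopA_succ]
    by_cases h1 : av.getD k 0 ≥ bb.getD k 0
    · rw [if_pos h1, ih, List.length_set]
    · rw [if_neg h1]
      by_cases h2 : k = 0
      · rw [if_pos h2]
      · rw [if_neg h2]
        cases hfind : pvFindJ av k with
        | none => rfl
        | some j => dsimp only; rw [ih, List.length_set]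

theorem pvLoopA_ret_stable (bb : List Int) (base den : Int) (hasRem : Bool) (n : Nat) :
    ∀ k av ret t, k ≤ t → ((pvLoopA bb base den hasRem n k av ret).2).getD t 0 = ret.getD t 0 := by
  intro k
  induction k with
  | zero => intro av ret t _; rfl
  | succ k ih =>
    intro av ret t ht
    rw [pvLoopA_succ]
    by_cases h1 : av.getD k 0 ≥ bb.getD k 0
    · rw [if_pos h1, ih _ _ t (by omega), pvGetD_set, if_neg (by omega)]
    · rw [if_neg h1]
      by_cases h2 : k = 0
      · rw [if_pos h2]
      · rw [if_neg h2]
        cases hfind : pvFindJ av k with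
        | none => rfl
        | some j =>
          dsimp only
          rw [ih _ _ t (by omega), pvGetD_set, if_neg (by omega)]

-- after one digit is written at slot k, the remaining loop leaves slot k alone
theorem pvTakeStep (bb : List Int) (base den : Int) (hasRem : Bool) (n k : Nat)
    (av ret : List Int) (v : Int) (hret : ret.length = n) (hk : k < n) :
    ((pvLoopA bb base den hasRem n k av (ret.set k v)).2).take (k + 1)
      = ((pvLoopA bb base den hasRem n k av (ret.set k v)).2).take k ++ [v] := by
  have hlen := pvLoopA_ret_length bb base den hasRem n k av (ret.set k v)
  rw [List.length_set, hret] at hlen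
  rw [pvTake_succ _ k (by omega),
    pvLoopA_ret_stable bb base den hasRem n k av _ k (le_refl k), pvGetD_set,
    if_pos ⟨rfl, by omega⟩]

theorem pvGetD_nonneg_of_mem (l : List Int) (h : ∀ d ∈ l, 0 ≤ d) (t : Nat) (ht : t < l.length) :
    0 ≤ l.getD t 0 := by
  rw [List.getD_eq_getElem (hn := ht)]
  exact h _ (List.getElem_mem ht)

theorem pvGetD_lt_of_mem (l : List Int) (base : Int) (h : ∀ d ∈ l, 0 ≤ d ∧ d < base) (t : Nat) (ht : t < l.length) :
    l.getD t 0 < base := by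
  rw [List.getD_eq_getElem (hn := ht)]
  exact (h _ (List.getElem_mem ht)).2

-- A's loop computes the borrow-flag digits, canonical-digit disjunct of Pre_
theorem pvFlag_of_canon (aa bb : List Int) (base den : Int) (hasRem : Bool) (n : Nat)
    (hna : aa.length = n) (hnb : bb.length = n)
    (HA : ∀ t, t < n → 0 ≤ aa.getD t 0)
    (HB : ∀ t, t < n → 0 ≤ bb.getD t 0)
    (HBlt : ∀ t, t + 1 < n → bb.getD t 0 < base) :
    ∀ k, k ≤ n → ∀ av ret c, ret.length = n → pvInvA aa base n k c av → (c = 0 ∨ c = 1) →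
      pvFeas aa bb k c →
      ((pvLoopA bb base den hasRem n k av ret).2).take k
          = (pvFlag aa bb base den hasRem n k c).1
        ∧ (pvFlag aa bb base den hasRem n k c).2 = 0 := by
  intro k
  induction k with
  | zero =>
    intro _ av ret c _ hinv _ _
    refine ⟨by simp [pvFlag], ?_⟩
    rcases hinv.2 with ⟨hc0, _⟩ | ⟨_, _, j, hj, _⟩
    · simp [pvFlag, hc0]
    · omega
  | succ k ih =>
    intro hk av ret c hret hinv hc hfeas
    obtain ⟨hlav, hinv2⟩ := hinv
    have hkn : k < n := by omega
    have haK : 0 ≤ aa.getD k 0 := HA k hkn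
    have hbK : 0 ≤ bb.getD k 0 := HB k hkn
    have hka : k < aa.length := by omega
    have hkb : k < bb.length := by omega
    have htA : aa.take (k + 1) = aa.take k ++ [aa.getD k 0] := pvTake_succ aa k hka
    have htB : bb.take (k + 1) = bb.take k ++ [bb.getD k 0] := pvTake_succ bb k hkb
    have hlent : (aa.take k).length = (bb.take k).length := by
      rw [pvLength_take aa k (by omega), pvLength_take bb k (by omega)]
    obtain ⟨hf1, hf2⟩ := hfeas
    rw [htA, htB] at hf1
    obtain ⟨hfp, hfq⟩ := (pvLexLt_append _ _ _ _ hlent).1 hf1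
    have hexpos : aa.take k ≠ bb.take k → ∃ t, t < k ∧ 0 < aa.getD t 0 := by
      intro hne
      have hq : ∀ d ∈ bb.take k, 0 ≤ d := by
        intro d hd
        rcases List.mem_iff_getElem.1 (List.mem_of_mem_take hd) with ⟨t, htl, rfl⟩
        have h2 := HB t (by omega)
        rwa [List.getD_eq_getElem (hn := htl)] at h2
      rcases pvLex_exists_pos _ _ hlent hfp hne hq with ⟨t, htl, htp⟩
      rw [pvLength_take aa k (by omega)] at htl
      rw [pvGetD_take aa k t htl] at htp
      exact ⟨t, htl, htp⟩
    rw [pvLoopA_succ, pvFlag_succ]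
    rcases hinv2 with ⟨hc0, hav⟩ | ⟨hc1, hkn', j, hjk, hjpos, havj, hmid, hlow⟩
    · subst hc0
      have havk : av.getD k 0 = aa.getD k 0 := hav k (Nat.lt_succ_self k)
      by_cases hge : av.getD k 0 ≥ bb.getD k 0
      · rw [if_pos hge, if_pos (show aa.getD k 0 - 0 - bb.getD k 0 ≥ 0 by omega),
          show av.getD k 0 - bb.getD k 0 = aa.getD k 0 - 0 - bb.getD k 0 by omega]
        obtain ⟨ih1, ih2⟩ := ih (by omega) av (ret.set k (aa.getD k 0 - 0 - bb.getD k 0)) 0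
          (by rw [List.length_set]; exact hret)
          ⟨hlav, Or.inl ⟨rfl, fun t ht => hav t (by omega)⟩⟩ (Or.inl rfl)
          ⟨hfp, by omega⟩
        exact ⟨by rw [pvTakeStep bb base den hasRem n k av ret _ hret (by omega), ih1], ih2⟩
      · have hne : aa.take k ≠ bb.take k := fun he => (hfq he) (by omega)
        have hk0 : k ≠ 0 := by
          intro h0; subst h0
          exact (hfq (by simp)) (by omega)
        rw [if_neg hge, if_neg hk0]
        rcases hexpos hne with ⟨t, htl, htp⟩
        rcases pvFindJ_finds av k t htl (by rw [hav t (by omega)]; exact htp) with ⟨j, hfind⟩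
        rcases pvFindJ_some av k j hfind with ⟨hjk, hjpos, hjmax⟩
        rw [hfind]
        dsimp only
        have hjlen : j < av.length := by omega
        have hv2k : (pvBump base (av.set j (av.getD j 0 - 1)) j k).getD k 0 = aa.getD k 0 := by
          rw [pvBump_getD, if_neg (by omega), pvGetD_set, if_neg (by omega), havk]
        rw [hv2k,
          show aa.getD k 0 + (if hasRem ∧ k = n - 1 then den else base) - bb.getD k 0
            = aa.getD k 0 - 0 - bb.getD k 0
              + (if hasRem ∧ k = n - 1 then den else base) from by ring,
          if_neg (show ¬ aa.getD k 0 - 0 - bb.getD k 0 ≥ 0 by omega)]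
        have hlav2 : ∀ u : Nat, (pvBump base (av.set j (av.getD j 0 - 1)) j k).getD u 0 =
            if j + 1 ≤ u ∧ u < k ∧ u < av.length
            then (if j = u ∧ j < av.length then av.getD j 0 - 1 else av.getD u 0) + (base - 1)
            else (if j = u ∧ j < av.length then av.getD j 0 - 1 else av.getD u 0) := by
          intro u
          rw [pvBump_getD, pvGetD_set, List.length_set]
        have havjj : av.getD j 0 = aa.getD j 0 := hav j (by omega)
        obtain ⟨ih1, ih2⟩ := ih (by omega) (pvBump base (av.set j (av.getD j 0 - 1)) j k)
          (ret.set k (aa.getD k 0 - 0 - bb.getD k 0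
            + (if hasRem ∧ k = n - 1 then den else base))) 1
          (by rw [List.length_set]; exact hret)
          ⟨by rw [pvBump_length, List.length_set]; exact hlav,
           Or.inr ⟨rfl, by omega, j, hjk,
             by rw [← havjj]; exact hjpos,
             by rw [hlav2 j, if_neg (by omega), if_pos ⟨rfl, hjlen⟩, havjj],
             fun t2 ht2a ht2b => by
               have hav2 : av.getD t2 0 = aa.getD t2 0 := hav t2 (by omega)
               have hz : aa.getD t2 0 = 0 := by
                 have h1 := hjmax t2 ht2a ht2b
                 have h2 := HA t2 (by omega)
                 omega
               exact ⟨hz, by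
                 rw [hlav2 t2, if_pos ⟨by omega, ht2b, by omega⟩, if_neg (by omega), hav2, hz]
                 ring⟩,
             fun t2 ht2 => by
               rw [hlav2 t2, if_neg (by omega), if_neg (by omega)]
               exact hav t2 (by omega)⟩⟩
          (Or.inr rfl) ⟨hfp, fun _ => hne⟩
        exact ⟨by
          rw [pvTakeStep bb base den hasRem n k
            (pvBump base (av.set j (av.getD j 0 - 1)) j k) ret _ hret (by omega), ih1], ih2⟩
    · subst hc1
      have hneq : aa.take (k + 1) ≠ bb.take (k + 1) := hf2 rfl
      rw [htA, htB] at hneq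
      have hne' : aa.take k ≠ bb.take k ∨ aa.getD k 0 ≠ bb.getD k 0 := by
        by_contra hcon
        push_neg at hcon
        exact hneq ((pvAppend_eq _ _ _ _ hlent).2 ⟨hcon.1, hcon.2⟩)
      rcases Nat.lt_succ_iff_lt_or_eq.1 hjk with hjlt | hjeq
      · obtain ⟨hak0, havkb⟩ := hmid k hjlt (Nat.lt_succ_self k)
        have hbltk : bb.getD k 0 < base := HBlt k (by omega)
        have hge : av.getD k 0 ≥ bb.getD k 0 := by rw [havkb]; omega
        rw [if_pos hge, if_neg (show ¬ aa.getD k 0 - 1 - bb.getD k 0 ≥ 0 by rw [hak0]; omega)]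
        have haddb : (if hasRem ∧ k = n - 1 then den else base) = base := by
          rw [if_neg]
          rintro ⟨_, h2⟩
          omega
        rw [haddb,
          show av.getD k 0 - bb.getD k 0 = aa.getD k 0 - 1 - bb.getD k 0 + base from by
            rw [havkb, hak0]; ring]
        have hnep : aa.take k ≠ bb.take k := by
          rcases hne' with h | h
          · exact h
          · intro he
            have h1 := hfq he
            have h2 := HB k hkn
            rw [hak0] at h
            omega
        obtain ⟨ih1, ih2⟩ := ih (by omega) av
          (ret.set k (aa.getD k 0 - 1 - bb.getD k 0 + base)) 1
          (by rw [List.length_set]; exact hret)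
          ⟨hlav, Or.inr ⟨rfl, by omega, j, hjlt, hjpos, havj,
            fun t ht1 ht2 => hmid t ht1 (by omega), hlow⟩⟩
          (Or.inr rfl) ⟨hfp, fun _ => hnep⟩
        exact ⟨by rw [pvTakeStep bb base den hasRem n k av ret _ hret (by omega), ih1], ih2⟩
      · subst hjeq
        by_cases hge : aa.getD j 0 - 1 ≥ bb.getD j 0
        · rw [if_pos (show av.getD j 0 ≥ bb.getD j 0 by rw [havj]; exact hge),
            if_pos (show aa.getD j 0 - 1 - bb.getD j 0 ≥ 0 by omega),
            show av.getD j 0 - bb.getD j 0 = aa.getD j 0 - 1 - bb.getD j 0 by rw [havj]]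
          obtain ⟨ih1, ih2⟩ := ih (by omega) av (ret.set j (aa.getD j 0 - 1 - bb.getD j 0)) 0
            (by rw [List.length_set]; exact hret)
            ⟨hlav, Or.inl ⟨rfl, fun t ht => hlow t ht⟩⟩ (Or.inl rfl)
            ⟨hfp, by omega⟩
          exact ⟨by rw [pvTakeStep bb base den hasRem n j av ret _ hret (by omega), ih1], ih2⟩
        · have hnep : aa.take j ≠ bb.take j := by
            rcases hne' with h | h
            · exact h
            · intro he
              have h1 := hfq he
              omega
          have hk0 : j ≠ 0 := by
            intro h0; subst h0
            exact hnep (by simp)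
          rw [if_neg (show ¬ av.getD j 0 ≥ bb.getD j 0 by rw [havj]; exact hge), if_neg hk0]
          rcases hexpos hnep with ⟨t, htl, htp⟩
          rcases pvFindJ_finds av j t htl (by rw [hlow t htl]; exact htp) with ⟨j2, hfind⟩
          rcases pvFindJ_some av j j2 hfind with ⟨hj2k, hj2pos, hj2max⟩
          rw [hfind]
          dsimp only
          have hj2l : j2 < av.length := by omega
          have hv2k : (pvBump base (av.set j2 (av.getD j2 0 - 1)) j2 j).getD j 0
              = aa.getD j 0 - 1 := by
            rw [pvBump_getD, if_neg (by omega), pvGetD_set, if_neg (by omega), havj]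
          rw [hv2k,
            show aa.getD j 0 - 1 + (if hasRem ∧ j = n - 1 then den else base) - bb.getD j 0
              = aa.getD j 0 - 1 - bb.getD j 0
                + (if hasRem ∧ j = n - 1 then den else base) from by ring,
            if_neg (show ¬ aa.getD j 0 - 1 - bb.getD j 0 ≥ 0 by omega)]
          have hlav2 : ∀ u : Nat, (pvBump base (av.set j2 (av.getD j2 0 - 1)) j2 j).getD u 0 =
              if j2 + 1 ≤ u ∧ u < j ∧ u < av.length
              then (if j2 = u ∧ j2 < av.length then av.getD j2 0 - 1 else av.getD u 0) + (base - 1)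
              else (if j2 = u ∧ j2 < av.length then av.getD j2 0 - 1 else av.getD u 0) := by
            intro u
            rw [pvBump_getD, pvGetD_set, List.length_set]
          have havjj : av.getD j2 0 = aa.getD j2 0 := hlow j2 hj2k
          obtain ⟨ih1, ih2⟩ := ih (by omega) (pvBump base (av.set j2 (av.getD j2 0 - 1)) j2 j)
            (ret.set j (aa.getD j 0 - 1 - bb.getD j 0
              + (if hasRem ∧ j = n - 1 then den else base))) 1
            (by rw [List.length_set]; exact hret)
            ⟨by rw [pvBump_length, List.length_set]; exact hlav,
             Or.inr ⟨rfl, by omega, j2, hj2k,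
               by rw [← havjj]; exact hj2pos,
               by rw [hlav2 j2, if_neg (by omega), if_pos ⟨rfl, hj2l⟩, havjj],
               fun t2 ht2a ht2b => by
                 have hav2 : av.getD t2 0 = aa.getD t2 0 := hlow t2 ht2b
                 have hz : aa.getD t2 0 = 0 := by
                   have h1 := hj2max t2 ht2a ht2b
                   have h2 := HA t2 (by omega)
                   omega
                 exact ⟨hz, by
                   rw [hlav2 t2, if_pos ⟨by omega, ht2b, by omega⟩, if_neg (by omega), hav2, hz]
                   ring⟩,
               fun t2 ht2 => by
                 rw [hlav2 t2, if_neg (by omega), if_neg (by omega)]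
                 exact hlow t2 (by omega)⟩⟩
            (Or.inr rfl) ⟨hfp, fun _ => hnep⟩
          exact ⟨by
            rw [pvTakeStep bb base den hasRem n j
              (pvBump base (av.set j2 (av.getD j2 0 - 1)) j2 j) ret _ hret (by omega), ih1], ih2⟩

-- A's loop computes the borrow-flag digits, adjacent-absorption disjunct of Pre_
theorem pvFlag_of_adj (aa bb : List Int) (base den : Int) (hasRem : Bool) (n : Nat)
    (hna : aa.length = n)
    (HC : ∀ i, i < n → aa.getD i 0 < bb.getD i 0 →
      1 ≤ i ∧ 0 < aa.getD (i - 1) 0 ∧ bb.getD (i - 1) 0 ≤ aa.getD (i - 1) 0 - 1) :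
    ∀ k, k ≤ n → ∀ av ret c, ret.length = n → av.length = aa.length → (c = 0 ∨ c = 1) →
      ((c = 0 ∧ ∀ t, t < k → av.getD t 0 = aa.getD t 0) ∨
       (c = 1 ∧ 1 ≤ k ∧ av.getD (k - 1) 0 = aa.getD (k - 1) 0 - 1 ∧
         bb.getD (k - 1) 0 ≤ aa.getD (k - 1) 0 - 1 ∧
         (∀ t, t < k - 1 → av.getD t 0 = aa.getD t 0))) →
      ((pvLoopA bb base den hasRem n k av ret).2).take k
          = (pvFlag aa bb base den hasRem n k c).1
        ∧ (pvFlag aa bb base den hasRem n k c).2 = 0 := by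
  intro k
  induction k with
  | zero =>
    intro _ av ret c _ _ _ hinv
    refine ⟨by simp [pvFlag], ?_⟩
    rcases hinv with ⟨hc0, _⟩ | ⟨_, hk1, _⟩
    · simp [pvFlag, hc0]
    · omega
  | succ k ih =>
    intro hk av ret c hret hlav hc hinv
    rw [pvLoopA_succ, pvFlag_succ]
    rcases hinv with ⟨hc0, hav⟩ | ⟨hc1, _, havk, hgek, hlow⟩
    · subst hc0
      have havk : av.getD k 0 = aa.getD k 0 := hav k (Nat.lt_succ_self k)
      by_cases hge : av.getD k 0 ≥ bb.getD k 0
      · rw [if_pos hge, if_pos (show aa.getD k 0 - 0 - bb.getD k 0 ≥ 0 by omega),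
          show av.getD k 0 - bb.getD k 0 = aa.getD k 0 - 0 - bb.getD k 0 by omega]
        obtain ⟨ih1, ih2⟩ := ih (by omega) av (ret.set k (aa.getD k 0 - 0 - bb.getD k 0)) 0
          (by rw [List.length_set]; exact hret) hlav (Or.inl rfl)
          (Or.inl ⟨rfl, fun t ht => hav t (by omega)⟩)
        exact ⟨by rw [pvTakeStep bb base den hasRem n k av ret _ hret (by omega), ih1], ih2⟩
      · have hdef : aa.getD k 0 < bb.getD k 0 := by omega
        obtain ⟨hk1, hpos, hgel⟩ := HC k (by omega) hdef
        obtain ⟨m, rfl⟩ : ∃ m, k = m + 1 := ⟨k - 1, by omega⟩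
        simp only [Nat.add_sub_cancel] at hpos hgel
        rw [if_neg hge, if_neg (by omega : ¬ m + 1 = 0)]
        have hfind : pvFindJ av (m + 1) = some m := by
          rw [pvFindJ, if_pos (by rw [hav m (by omega)]; exact hpos)]
        rw [hfind]
        dsimp only
        have hbump : pvBump base (av.set m (av.getD m 0 - 1)) m (m + 1)
            = av.set m (av.getD m 0 - 1) := by
          rw [pvBump, (show (m + 1) - (m + 1) = 0 by omega)]
          rfl
        have hmlen : m < av.length := by omega
        have hv2k : (av.set m (av.getD m 0 - 1)).getD (m + 1) 0 = aa.getD (m + 1) 0 := by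
          rw [pvGetD_set, if_neg (by omega), hav (m + 1) (by omega)]
        rw [hbump, hv2k,
          show aa.getD (m + 1) 0 + (if hasRem ∧ m + 1 = n - 1 then den else base)
              - bb.getD (m + 1) 0
            = aa.getD (m + 1) 0 - 0 - bb.getD (m + 1) 0
              + (if hasRem ∧ m + 1 = n - 1 then den else base) from by ring,
          if_neg (show ¬ aa.getD (m + 1) 0 - 0 - bb.getD (m + 1) 0 ≥ 0 by omega)]
        obtain ⟨ih1, ih2⟩ := ih (by omega) (av.set m (av.getD m 0 - 1))
          (ret.set (m + 1) (aa.getD (m + 1) 0 - 0 - bb.getD (m + 1) 0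
            + (if hasRem ∧ m + 1 = n - 1 then den else base))) 1
          (by rw [List.length_set]; exact hret) (by rw [List.length_set]; exact hlav)
          (Or.inr rfl)
          (Or.inr ⟨rfl, by omega,
            by rw [Nat.add_sub_cancel, pvGetD_set, if_pos ⟨rfl, hmlen⟩, hav m (by omega)],
            by rw [Nat.add_sub_cancel]; exact hgel,
            fun t ht => by
              rw [Nat.add_sub_cancel] at ht
              rw [pvGetD_set, if_neg (by omega)]
              exact hav t (by omega)⟩)
        exact ⟨by rw [pvTakeStep bb base den hasRem n (m + 1) (av.set m (av.getD m 0 - 1)) ret _ hret (by omega), ih1], ih2⟩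
    · subst hc1
      simp only [Nat.add_sub_cancel] at havk hgek
      have hge : av.getD k 0 ≥ bb.getD k 0 := by omega
      rw [if_pos hge, if_pos (show aa.getD k 0 - 1 - bb.getD k 0 ≥ 0 by omega),
        show av.getD k 0 - bb.getD k 0 = aa.getD k 0 - 1 - bb.getD k 0 by omega]
      obtain ⟨ih1, ih2⟩ := ih (by omega) av (ret.set k (aa.getD k 0 - 1 - bb.getD k 0)) 0
        (by rw [List.length_set]; exact hret) hlav (Or.inl rfl)
        (Or.inl ⟨rfl, fun t ht => hlow t (by simpa using ht)⟩)
      exact ⟨by rw [pvTakeStep bb base den hasRem n k av ret _ hret (by omega), ih1], ih2⟩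

-- B's reversed fold computes the same borrow-flag recursion
theorem pvFoldB_eq (aa bb : List Int) (base den : Int) (hasRem : Bool) (n : Nat)
    (hna : aa.length = n) (hnb : bb.length = n) :
    ∀ k, k ≤ n → ∀ (c add : Int) (rout : List Int),
      (1 ≤ k → add = (if hasRem ∧ k - 1 = n - 1 then den else base)) →
      (((aa.take k).reverse.zip ((bb.take k).reverse)).foldl (pvStepB base) (rout, c, add))
        = (rout ++ (pvFlag aa bb base den hasRem n k c).1.reverse,
           (pvFlag aa bb base den hasRem n k c).2,
           if k = 0 then add else base) := by
  intro k
  induction k with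
  | zero =>
    intro _ c add rout _
    simp [pvFlag]
  | succ k ih =>
    intro hk c add rout hadd
    have hka : k < aa.length := by omega
    have hkb : k < bb.length := by omega
    have haddv : add = (if hasRem ∧ k = n - 1 then den else base) := by
      have h1 := hadd (by omega)
      simpa using h1
    have hbase : 1 ≤ k → (base : Int) = (if hasRem ∧ k - 1 = n - 1 then den else base) := by
      intro h1
      rw [if_neg]
      rintro ⟨_, h2⟩
      omega
    rw [pvTakeRev_succ aa k hka, pvTakeRev_succ bb k hkb, List.zip_cons_cons, List.foldl_cons,
      pvFlag_succ]
    by_cases hd : aa.getD k 0 - c - bb.getD k 0 ≥ 0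
    · rw [if_pos hd,
        show pvStepB base (rout, c, add) (aa.getD k 0, bb.getD k 0)
          = (rout ++ [aa.getD k 0 - c - bb.getD k 0], 0, base) from by
            simp only [pvStepB]; rw [if_pos hd],
        ih (by omega) 0 base _ hbase]
      simp
    · rw [if_neg hd,
        show pvStepB base (rout, c, add) (aa.getD k 0, bb.getD k 0)
          = (rout ++ [aa.getD k 0 - c - bb.getD k 0 + add], 1, base) from by
            simp only [pvStepB]; rw [if_neg hd],
        ih (by omega) 1 base _ hbase, haddv]
      simp

theorem long_sub_same_len_spec : Claim_equal_long_sub_same_len := by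
  intro a b base remainder denominator _ hpre
  obtain ⟨hlen, hdisj⟩ := hpre
  unfold Spec_long_sub_same_len long_sub_same_len long_sub_same_len_alt
  have hne : ¬ a.length ≠ b.length := fun h => h hlen
  rcases remainder with _ | r
  · dsimp only at hdisj ⊢
    rw [if_neg hne, if_neg hne]
    have hbtake : b.take a.length = b := by rw [hlen, List.take_length]
    have hmain :
        ((pvLoopA b base denominator false a.length a.length a
            (List.replicate a.length 0)).2).take a.length
          = (pvFlag a b base denominator false a.length a.length 0).1
        ∧ (pvFlag a b base denominator false a.length a.length 0).2 = 0 := by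
      rcases hdisj with hC | ⟨hA, hB, _, hlex⟩
      · exact pvFlag_of_adj a b base denominator false a.length rfl hC a.length (le_refl _)
          a (List.replicate a.length 0) 0 (by simp) rfl (Or.inl rfl)
          (Or.inl ⟨rfl, fun t _ => rfl⟩)
      · exact pvFlag_of_canon a b base denominator false a.length rfl hlen.symm
          (fun t ht => pvGetD_nonneg_of_mem a hA t ht)
          (fun t ht => pvGetD_nonneg_of_mem b (fun d hd => (hB d hd).1) t (by omega))
          (fun t ht => pvGetD_lt_of_mem b base hB t (by omega))
          a.length (le_refl _) a (List.replicate a.length 0) 0 (by simp)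
          ⟨rfl, Or.inl ⟨rfl, fun t _ => rfl⟩⟩ (Or.inl rfl)
          ⟨by rw [List.take_length, hbtake]; exact hlex,
           fun h => absurd h (by norm_num)⟩
    obtain ⟨hm1, hm2⟩ := hmain
    have hfold := pvFoldB_eq a b base denominator false a.length rfl hlen.symm
      a.length (le_refl _) 0 base [] (fun _ => by rw [if_neg (by simp)])
    rw [List.take_length, hbtake, List.nil_append] at hfold
    simp only [Option.isSome_none, Bool.false_eq_true, if_false, hfold]
    rw [if_neg (by simp [hm2])]
    have hfl : ((pvLoopA b base denominator false a.length a.length a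
        (List.replicate a.length 0)).2).length = a.length := by
      rw [pvLoopA_ret_length, List.length_replicate]
    rw [List.take_of_length_le (le_of_eq hfl)] at hm1
    rw [hm1, List.reverse_reverse]
  · dsimp only at hdisj ⊢
    rw [if_neg hne, if_neg hne]
    have hlena : (a ++ [r.1]).length = a.length + 1 := by simp
    have hlenb : (b ++ [r.2]).length = a.length + 1 := by simp [hlen]
    have hnb : (b ++ [r.2]).length = (a ++ [r.1]).length := by rw [hlena, hlenb]
    have hbtake : (b ++ [r.2]).take (a ++ [r.1]).length = b ++ [r.2] := by
      rw [← hnb, List.take_length]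
    have hmain :
        ((pvLoopA (b ++ [r.2]) base denominator true (a ++ [r.1]).length (a ++ [r.1]).length
            (a ++ [r.1]) (List.replicate (a ++ [r.1]).length 0)).2).take (a ++ [r.1]).length
          = (pvFlag (a ++ [r.1]) (b ++ [r.2]) base denominator true (a ++ [r.1]).length
              (a ++ [r.1]).length 0).1
        ∧ (pvFlag (a ++ [r.1]) (b ++ [r.2]) base denominator true (a ++ [r.1]).length
            (a ++ [r.1]).length 0).2 = 0 := by
      rcases hdisj with hC | ⟨hA, hB, ⟨hR1, hR2⟩, hlex⟩
      · exact pvFlag_of_adj (a ++ [r.1]) (b ++ [r.2]) base denominator true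
          (a ++ [r.1]).length rfl hC (a ++ [r.1]).length (le_refl _)
          (a ++ [r.1]) (List.replicate (a ++ [r.1]).length 0) 0 (by simp) rfl (Or.inl rfl)
          (Or.inl ⟨rfl, fun t _ => rfl⟩)
      · have HA' : ∀ t, t < (a ++ [r.1]).length → 0 ≤ (a ++ [r.1]).getD t 0 := by
          intro t ht
          rw [hlena] at ht
          rcases Nat.lt_succ_iff_lt_or_eq.1 ht with h | h
          · rw [pvGetD_append_lt a r.1 t h]
            exact pvGetD_nonneg_of_mem a hA t h
          · subst h; rw [pvGetD_append_len]; exact hR1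
        have HB' : ∀ t, t < (a ++ [r.1]).length → 0 ≤ (b ++ [r.2]).getD t 0 := by
          intro t ht
          rw [hlena] at ht
          rcases Nat.lt_succ_iff_lt_or_eq.1 ht with h | h
          · rw [pvGetD_append_lt b r.2 t (by omega)]
            exact pvGetD_nonneg_of_mem b (fun d hd => (hB d hd).1) t (by omega)
          · subst h
            rw [show a.length = b.length from hlen, pvGetD_append_len]
            exact hR2
        have HBlt' : ∀ t, t + 1 < (a ++ [r.1]).length → (b ++ [r.2]).getD t 0 < base := by
          intro t ht
          rw [hlena] at ht
          rw [pvGetD_append_lt b r.2 t (by omega)]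
          exact pvGetD_lt_of_mem b base hB t (by omega)
        exact pvFlag_of_canon (a ++ [r.1]) (b ++ [r.2]) base denominator true
          (a ++ [r.1]).length rfl hnb HA' HB' HBlt'
          (a ++ [r.1]).length (le_refl _) (a ++ [r.1])
          (List.replicate (a ++ [r.1]).length 0) 0 (by simp)
          ⟨rfl, Or.inl ⟨rfl, fun t _ => rfl⟩⟩ (Or.inl rfl)
          ⟨by rw [List.take_length, hbtake]; exact hlex,
           fun h => absurd h (by norm_num)⟩
    obtain ⟨hm1, hm2⟩ := hmain
    have hfold := pvFoldB_eq (a ++ [r.1]) (b ++ [r.2]) base denominator true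
      (a ++ [r.1]).length rfl hnb (a ++ [r.1]).length (le_refl _) 0 denominator []
      (fun _ => by rw [if_pos ⟨rfl, rfl⟩])
    rw [List.take_length, hbtake, List.nil_append] at hfold
    rw [hlena] at hm1 hm2 hfold
    simp only [Option.isSome_some, if_true, hfold]
    rw [if_neg (by simp [hm2])]
    have hfl : ((pvLoopA (b ++ [r.2]) base denominator true (a.length + 1)
        (a.length + 1) (a ++ [r.1]) (List.replicate (a.length + 1) 0)).2).length
        = a.length + 1 := by
      rw [pvLoopA_ret_length, List.length_replicate]
    rw [List.take_of_length_le (le_of_eq hfl)] at hm1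
    rw [hlena, hm1, List.reverse_reverse]
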